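-- pv_equiv track=rewrite | github.com/Inolas/python | edX(MIT)/order.py | item_order
-- ===== SOURCE A (Python) =====
-- def item_order(order):
--     salad = 0
--     hamburger = 0
--     water = 0
--     item=order.split()
--     for check in item:
--         if check == 'salad' :
--             salad+=1
--         elif check == 'water' :
--             water+=1
--         elif check == 'hamburger':
--             hamburger+=1
--     return ('salad:'+str(salad)+' hamburger:'+str(hamburger)+' water:'+str(water))
-- ===== SOURCE B (Python) =====
-- def item_order(order):
--     items = sorted(order.split())
--     counts = {}
--     rest = items
--     while rest:
--         head = rest[0]
--         k = 0
--         while k < len(rest) and rest[k] == head: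
--             k += 1
--         counts[head] = k
--         rest = rest[k:]
--     return ('salad:' + str(counts.get('salad', 0))
--             + ' hamburger:' + str(counts.get('hamburger', 0))
--             + ' water:' + str(counts.get('water', 0)))
-- ===== Notes on version B (the rewrite author's own statement) =====
-- stated objective: alternative
-- what changed: Replaces A's single branching accumulator loop with sort-then-group: B sorts the split tokens, builds a run-length frequency dict by scanning maximal runs of equal adjacent words, and formats from three dict lookups.
import Mathlib
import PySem

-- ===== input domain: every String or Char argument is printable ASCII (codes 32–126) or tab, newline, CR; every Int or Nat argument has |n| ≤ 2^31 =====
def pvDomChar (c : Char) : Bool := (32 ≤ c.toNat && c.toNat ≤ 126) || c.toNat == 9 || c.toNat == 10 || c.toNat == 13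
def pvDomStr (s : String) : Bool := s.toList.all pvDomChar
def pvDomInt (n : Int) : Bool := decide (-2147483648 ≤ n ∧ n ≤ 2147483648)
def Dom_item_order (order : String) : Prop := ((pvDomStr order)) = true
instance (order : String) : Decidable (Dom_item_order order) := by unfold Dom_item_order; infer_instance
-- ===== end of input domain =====

-- A: one branching tally pass over the split words. B: sort-then-group — sort the tokens, build a
-- run-length frequency dict over the sorted list, then look the three keys up (alternative algorithm).

-- ===== PORT A =====
def pvStep (acc : Int × Int × Int) (check : String) : Int × Int × Int :=
  if check == "salad" then (acc.1 + 1, acc.2.1, acc.2.2)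
  else if check == "water" then (acc.1, acc.2.1, acc.2.2 + 1)
  else if check == "hamburger" then (acc.1, acc.2.1 + 1, acc.2.2)
  else acc

def item_order (order : String) : String :=
  let items := PySem.Str.split₀ order
  let st := items.foldl pvStep (0, 0, 0)
  "salad:" ++ PySem.Int.toStr st.1 ++ " hamburger:" ++ PySem.Int.toStr st.2.1
    ++ " water:" ++ PySem.Int.toStr st.2.2

-- ===== PORT B =====
-- inner while: length of the maximal leading run of elements equal to head
def pvRunLen (head : String) : List String → Nat
  | [] => 0
  | x :: xs => if x == head then 1 + pvRunLen head xs else 0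

-- outer while: record each run's head with its length, continue on the remainder
def pvTally : List String → PySem.Dict String Int → PySem.Dict String Int
  | [], counts => counts
  | x :: xs, counts =>
      let k := pvRunLen x (x :: xs)
      pvTally ((x :: xs).drop k) (counts.insert x (k : Int))
termination_by l => l.length
decreasing_by
  simp only [pvRunLen, BEq.rfl, if_true, Nat.add_comm 1, List.drop_succ_cons,
    List.length_drop, List.length_cons]
  omega

def item_order_alt (order : String) : String :=
  let items := PySem.List.sorted (PySem.Str.split₀ order) (fun x => x) false
  let counts := pvTally items PySem.Dict.empty
  "salad:" ++ PySem.Int.toStr (counts.getD "salad" 0)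
    ++ " hamburger:" ++ PySem.Int.toStr (counts.getD "hamburger" 0)
    ++ " water:" ++ PySem.Int.toStr (counts.getD "water" 0)

-- ===== PRECONDITION & SPEC =====
def Spec_item_order (order : String) (out : String) : Prop := out = item_order_alt order
instance (order : String) (out : String) : Decidable (Spec_item_order order out) := by unfold Spec_item_order; infer_instance

-- ===== CLAIM (what is proved, stated in full; the proofs are below) =====
def Claim_equal_item_order : Prop := ∀ (order : String), Dom_item_order order → Spec_item_order order (item_order order)

-- ===== LEMMAS AND PROOFS =====

theorem pv_fold_counts (l : List String) (s h w : Int) :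
    l.foldl pvStep (s, h, w)
    = (s + l.count "salad", h + l.count "hamburger", w + l.count "water") := by
  induction l generalizing s h w with
  | nil => simp
  | cons x xs ih =>
    simp only [List.foldl_cons, List.count_cons]
    by_cases h1 : x = "salad"
    · subst h1; rw [show pvStep (s, h, w) "salad" = (s + 1, h, w) from rfl, ih]
      simp; ring
    · by_cases h2 : x = "water"
      · subst h2; rw [show pvStep (s, h, w) "water" = (s, h, w + 1) from rfl, ih]
        simp; ring
      · by_cases h3 : x = "hamburger"
        · subst h3; rw [show pvStep (s, h, w) "hamburger" = (s, h + 1, w) from rfl, ih]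
          simp; ring
        · rw [show pvStep (s, h, w) x = (s, h, w) by simp [pvStep, h1, h2, h3], ih]
          simp [h1, h2, h3]

theorem pv_runLen_eq_takeWhile (head : String) (l : List String) :
    pvRunLen head l = (l.takeWhile (fun y => y == head)).length := by
  induction l with
  | nil => rfl
  | cons x xs ih =>
    by_cases hx : x = head
    · subst hx; simp [pvRunLen, ih]; omega
    · simp [pvRunLen, hx]

theorem pv_drop_runLen (x : String) (xs : List String) :
    xs.drop (pvRunLen x xs) = xs.dropWhile (fun y => y == x) := by
  induction xs with
  | nil => rfl
  | cons y ys ih =>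
    by_cases hy : y = x
    · subst hy
      simp only [pvRunLen, BEq.rfl, if_true, List.dropWhile_cons, Nat.add_comm 1,
        List.drop_succ_cons, ih]
    · simp [pvRunLen, hy]

theorem pv_dropWhile_head (p : String → Bool) (l : List String) (a : String) (l' : List String)
    (h : l.dropWhile p = a :: l') : p a = false := by
  induction l with
  | nil => simp [List.dropWhile] at h
  | cons y ys ih =>
    by_cases hy : p y
    · rw [List.dropWhile_cons, if_pos hy] at h; exact ih h
    · rw [List.dropWhile_cons, if_neg hy] at h
      cases h; simpa using hy

theorem pv_not_mem_dropWhile (x : String) (xs : List String)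
    (hp : xs.Pairwise (· ≤ ·)) (hle : ∀ y ∈ xs, x ≤ y) :
    x ∉ xs.dropWhile (fun y => y == x) := by
  intro hmem
  cases hr : xs.dropWhile (fun y => y == x) with
  | nil => rw [hr] at hmem; simp at hmem
  | cons h t =>
    have hhx : h ≠ x := by
      have := pv_dropWhile_head _ _ _ _ hr
      simpa using this
    have hsub : (h :: t).Sublist xs := hr ▸ List.dropWhile_sublist _
    have hxh : x ≤ h := hle h (hsub.mem (by simp))
    rw [hr] at hmem
    rcases List.mem_cons.mp hmem with heq | hmt
    · exact hhx heq.symm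
    · have hht : h ≤ x := by
        have := (List.pairwise_cons.mp (hp.sublist hsub)).1
        exact this x hmt
      exact hhx (le_antisymm hht hxh)

-- the run-length dict of a sorted list answers List.count
theorem pv_tally_getD (n : Nat) : ∀ (l : List String) (d : PySem.Dict String Int) (v : String),
    l.length ≤ n → l.Pairwise (· ≤ ·) →
    (pvTally l d).getD v 0 = if v ∈ l then (l.count v : Int) else d.getD v 0 := by
  induction n with
  | zero =>
    intro l d v hlen _
    have : l = [] := List.eq_nil_of_length_eq_zero (Nat.le_zero.mp hlen)
    subst this; simp [pvTally]
  | succ n ih =>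
    intro l d v hlen hs
    cases l with
    | nil => simp [pvTally]
    | cons x xs =>
      have hxle : ∀ y ∈ xs, x ≤ y := (List.pairwise_cons.mp hs).1
      have hpxs : xs.Pairwise (· ≤ ·) := (List.pairwise_cons.mp hs).2
      have hdrop : (x :: xs).drop (pvRunLen x (x :: xs)) = xs.dropWhile (fun y => y == x) := by
        have : pvRunLen x (x :: xs) = 1 + pvRunLen x xs := by simp [pvRunLen]
        rw [this, Nat.add_comm, List.drop_succ_cons, pv_drop_runLen]
      set t := xs.takeWhile (fun y => y == x) with ht
      set r := xs.dropWhile (fun y => y == x) with hr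
      have hxs : xs = t ++ r := (List.takeWhile_append_dropWhile).symm
      have hklen : pvRunLen x (x :: xs) = 1 + t.length := by
        simp [pvRunLen, pv_runLen_eq_takeWhile, ht]
      have htall : ∀ y ∈ t, y = x := by
        intro y hy; simpa using List.mem_takeWhile_imp hy
      have hxr : x ∉ r := pv_not_mem_dropWhile x xs hpxs hxle
      have hrlen : r.length ≤ n := by
        have h1 : r.length ≤ xs.length := (List.dropWhile_sublist _).length_le
        have h2 : xs.length + 1 ≤ n + 1 := by simpa using hlen
        omega
      have hpr : r.Pairwise (· ≤ ·) := hpxs.sublist (List.dropWhile_sublist _)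
      rw [pvTally]
      rw [hdrop, ih r _ v hrlen hpr]
      by_cases hvx : v = x
      · have hcount : (x :: xs).count x = 1 + t.length := by
          rw [List.count_cons_self, hxs, List.count_append]
          have h1 : t.count x = t.length := List.count_eq_length.mpr (fun b hb => (htall b hb).symm)
          have h2 : r.count x = 0 := List.count_eq_zero.mpr hxr
          omega
        rw [hvx, if_neg hxr, PySem.Dict.getD_insert_self, if_pos (List.mem_cons_self ..), hklen,
          hcount]
      · have hmem : v ∈ x :: xs ↔ v ∈ r := by
          constructor
          · intro hv
            rcases List.mem_cons.mp hv with h | h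
            · exact absurd h hvx
            · rw [hxs] at h
              rcases List.mem_append.mp h with h | h
              · exact absurd (htall v h) hvx
              · exact h
          · intro hv; exact List.mem_cons_of_mem _ (hxs ▸ List.mem_append_right _ hv)
        have hcnt : (x :: xs).count v = r.count v := by
          rw [List.count_cons_of_ne (Ne.symm hvx), hxs, List.count_append]
          have : t.count v = 0 := List.count_eq_zero.mpr (fun h => hvx (htall v h))
          omega
        rw [PySem.Dict.getD_insert, if_neg hvx]
        by_cases hv : v ∈ r
        · rw [if_pos hv, if_pos (hmem.mpr hv), hcnt]
        · rw [if_neg hv, if_neg (fun h => hv (hmem.mp h))]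

theorem pv_final (l0 : List String) (v : String) :
    (pvTally (PySem.List.sorted l0 (fun x => x) false) PySem.Dict.empty).getD v 0
      = (l0.count v : Int) := by
  set ls := PySem.List.sorted l0 (fun x => x) false with hls
  have hp : ls.Pairwise (· ≤ ·) := PySem.List.sorted_pairwise l0 (fun x => x)
  have hperm : ls.Perm l0 := PySem.List.sorted_perm l0 (fun x => x) false
  rw [pv_tally_getD ls.length ls PySem.Dict.empty v le_rfl hp]
  by_cases hv : v ∈ ls
  · rw [if_pos hv, hperm.count_eq]
  · rw [if_neg hv, PySem.Dict.getD_empty]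
    have : l0.count v = 0 := List.count_eq_zero.mpr (fun h => hv (hperm.mem_iff.mpr h))
    simp [this]

-- ===== VERDICT (by name: the statement is the Claim_ definition above) =====
theorem item_order_spec : Claim_equal_item_order := by
  intro order _
  unfold Spec_item_order item_order item_order_alt
  simp only [pv_fold_counts, zero_add, pv_final]
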